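-- pv_equiv track=rewrite | github.com/DevJofre/-ListComprehension | atv9.py | produtos_de_tres_primos
-- ===== SOURCE A (Python) =====
-- import math
--
-- def eh_primo(n):
--     if n <= 1:
--         return False
--     for i in range(2, int(math.sqrt(n)) + 1):
--         if n % i == 0:
--             return False
--     return True
--
-- def gerar_primos(limite):
--     primos = []
--     for num in range(2, limite + 1):
--         if eh_primo(num):
--             primos.append(num)
--     return primos
--
-- def produtos_de_tres_primos(limite):
--     primos = gerar_primos(limite)
--     produtos = []
--
--     for i in range(len(primos)):
--         for j in range(i + 1, len(primos)):
--             for k in range(j + 1, len(primos)):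
--                 produto = primos[i] * primos[j] * primos[k]
--                 produtos.append(produto)
--
--     return produtos
-- ===== SOURCE B (Python) =====
-- def _crivo(limite):
--     # Sieve of Eratosthenes: mark composites, then collect the survivors in order.
--     marcados = set()
--     i = 2
--     while i * i <= limite:
--         for m in range(i * i, limite + 1, i):
--             marcados.add(m)
--         i += 1
--     return [n for n in range(2, limite + 1) if n not in marcados]
--
--
-- def produtos_de_tres_primos(limite):
--     primos = _crivo(limite)
--     produtos = []
--     resto = primos
--     while resto:
--         p, cauda = resto[0], resto[1:]
--         resto2 = cauda
--         while resto2: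
--             q, cauda2 = resto2[0], resto2[1:]
--             for r in cauda2:
--                 produtos.append(p * q * r)
--             resto2 = cauda2
--         resto = cauda
--     return produtos
-- ===== Notes on version B (the rewrite author's own statement) =====
-- stated objective: alternative
-- what changed: Prime generation switches from per-number trial division up to sqrt(n) to a Sieve of Eratosthenes (mark multiples of each i with i*i<=limite, collect the unmarked numbers), and the triple products are enumerated by walking list suffixes instead of triple index loops.
import Mathlib
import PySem

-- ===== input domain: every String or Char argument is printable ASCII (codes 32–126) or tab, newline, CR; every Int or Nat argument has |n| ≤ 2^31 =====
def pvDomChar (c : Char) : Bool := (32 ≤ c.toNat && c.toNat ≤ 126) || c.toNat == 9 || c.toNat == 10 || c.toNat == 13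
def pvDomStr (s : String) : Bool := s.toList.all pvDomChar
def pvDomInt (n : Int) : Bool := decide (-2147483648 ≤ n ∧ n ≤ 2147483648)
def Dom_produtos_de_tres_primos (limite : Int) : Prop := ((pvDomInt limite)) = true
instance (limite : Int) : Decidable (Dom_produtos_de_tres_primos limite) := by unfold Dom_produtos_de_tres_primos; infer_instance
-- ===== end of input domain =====

-- B replaces A's per-number trial-division primality test by a Sieve of Eratosthenes
-- (mark multiples in a set, collect survivors) and enumerates the triples by walking
-- list suffixes instead of index triples; same overall cost (the triple output dominates).

-- ===== PORT A =====
-- int(math.sqrt(n)) is ported as Nat.sqrt: exact for 0 ≤ n ≤ 2^31 (double sqrt is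
-- correctly rounded and never crosses an integer boundary for such n).
def eh_primo (n : Int) : Bool :=
  if n ≤ 1 then false
  else (PySem.List.pyRange 2 ((Nat.sqrt n.toNat : Int) + 1) 1).all
        (fun i => !(PySem.Int.mod n i == 0))

def gerar_primos (limite : Int) : List Int :=
  (PySem.List.pyRange 2 (limite + 1) 1).foldl
    (fun primos num => if eh_primo num then primos ++ [num] else primos) []

def produtos_de_tres_primos (limite : Int) : List Int :=
  let primos := gerar_primos limite
  let n : Int := (primos.length : Int)
  (PySem.List.pyRange 0 n 1).foldl (fun acc i =>
    (PySem.List.pyRange (i + 1) n 1).foldl (fun acc j =>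
      (PySem.List.pyRange (j + 1) n 1).foldl (fun acc k =>
        acc ++ [PySem.List.pyGetD primos i 0 * PySem.List.pyGetD primos j 0 *
                PySem.List.pyGetD primos k 0]) acc) acc) []

-- ===== PORT B =====
-- the sieve's `while i * i <= limite` loop; the bound 2 ≤ i is carried for termination
def crivoLoop (limite : Int) (i : Int) (hi : 2 ≤ i) (marcados : PySem.Set Int) :
    PySem.Set Int :=
  if i * i ≤ limite then
    crivoLoop limite (i + 1) (by omega)
      ((PySem.List.pyRange (i * i) (limite + 1) i).foldl
        (fun s m => PySem.Set.add s m) marcados)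
  else marcados
termination_by (limite - i).toNat
decreasing_by
  have h2 : 2 * i ≤ i * i := by nlinarith
  omega

def crivo (limite : Int) : List Int :=
  let marcados := crivoLoop limite 2 (by omega) PySem.Set.empty
  (PySem.List.pyRange 2 (limite + 1) 1).filter
    (fun n => !(PySem.Set.contains marcados n))

-- inner `while resto2:` loop appending the p*q*r products
def prodParesAcc (p : Int) : List Int → List Int → List Int
  | acc, [] => acc
  | acc, q :: cauda2 => prodParesAcc p (acc ++ cauda2.map (fun r => p * q * r)) cauda2

-- outer `while resto:` loop over the suffixes of the prime list
def triplosAcc : List Int → List Int → List Int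
  | acc, [] => acc
  | acc, p :: cauda => triplosAcc (prodParesAcc p acc cauda) cauda

def produtos_de_tres_primos_alt (limite : Int) : List Int :=
  triplosAcc [] (crivo limite)

-- ===== PRECONDITION & SPEC =====
def Spec_produtos_de_tres_primos (limite : Int) (out : List Int) : Prop := out = produtos_de_tres_primos_alt limite
instance (limite : Int) (out : List Int) : Decidable (Spec_produtos_de_tres_primos limite out) := by unfold Spec_produtos_de_tres_primos; infer_instance

-- ===== CLAIM (what is proved, stated in full; the proofs are below) =====
def Claim_equal_produtos_de_tres_primos : Prop := ∀ (limite : Int), Dom_produtos_de_tres_primos limite → Spec_produtos_de_tres_primos limite (produtos_de_tres_primos limite)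

-- ===== LEMMAS AND PROOFS =====

-- pure (accumulator-free) forms of B's two loops
def prodParesP (p : Int) : List Int → List Int
  | [] => []
  | q :: c => c.map (fun r => p * q * r) ++ prodParesP p c

def triplosP : List Int → List Int
  | [] => []
  | p :: c => prodParesP p c ++ triplosP c

theorem prodParesAcc_eq (p : Int) (l : List Int) : ∀ acc,
    prodParesAcc p acc l = acc ++ prodParesP p l := by
  induction l with
  | nil => intro acc; simp [prodParesAcc, prodParesP]
  | cons q c ih => intro acc; simp [prodParesAcc, prodParesP, ih]

theorem triplosAcc_eq (l : List Int) : ∀ acc,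
    triplosAcc acc l = acc ++ triplosP l := by
  induction l with
  | nil => intro acc; simp [triplosAcc, triplosP]
  | cons p c ih => intro acc; simp [triplosAcc, triplosP, ih, prodParesAcc_eq]

theorem mem_foldl_add (l : List Int) : ∀ (s : PySem.Set Int) (x : Int),
    x ∈ l.foldl (fun s m => PySem.Set.add s m) s ↔ x ∈ s ∨ x ∈ l := by
  induction l with
  | nil => simp
  | cons y ys ih =>
      intro s x
      simp [List.foldl_cons, ih, PySem.Set.mem_add]
      tauto

theorem mem_crivoLoop (limite : Int) : ∀ (i : Int) (hi : 2 ≤ i) (s : PySem.Set Int)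
    (x : Int), x ∈ crivoLoop limite i hi s ↔
      x ∈ s ∨ ∃ d, i ≤ d ∧ d * d ≤ limite ∧ d ∣ x ∧ d * d ≤ x ∧ x ≤ limite := by
  intro i hi s x
  induction i, hi, s using crivoLoop.induct limite with
  | case1 i hi s hle ih =>
      rw [crivoLoop, if_pos hle, ih]
      rw [mem_foldl_add]
      have hmem : x ∈ PySem.List.pyRange (i * i) (limite + 1) i ↔
          i * i ≤ x ∧ x < limite + 1 ∧ i ∣ (x - i * i) := by
        rw [PySem.List.mem_pyRange_iff_of_pos (by omega)]
      constructor
      · rintro (⟨hs | hr⟩ | ⟨d, hd1, hd2, hd3, hd4, hd5⟩)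
        · exact Or.inl hs
        · rw [hmem] at hr
          refine Or.inr ⟨i, le_refl i, hle, ?_, hr.1, by omega⟩
          have hdv : i ∣ x - i * i := hr.2.2
          have h2 : i ∣ i * i := Dvd.intro i rfl
          have := dvd_add hdv h2
          simpa using this
        · exact Or.inr ⟨d, by omega, hd2, hd3, hd4, hd5⟩
      · rintro (hs | ⟨d, hd1, hd2, hd3, hd4, hd5⟩)
        · exact Or.inl (Or.inl hs)
        · by_cases hdi : d = i
          · subst hdi
            refine Or.inl (Or.inr ?_)
            rw [hmem]
            refine ⟨hd4, by omega, ?_⟩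
            have h2 : d ∣ d * d := Dvd.intro d rfl
            exact dvd_sub hd3 h2
          · exact Or.inr ⟨d, by omega, hd2, hd3, hd4, hd5⟩
  | case2 i hi s hle =>
      rw [crivoLoop, if_neg hle]
      constructor
      · exact Or.inl
      · rintro (hs | ⟨d, hd1, hd2, hd3, hd4, hd5⟩)
        · exact hs
        · exfalso
          have : i * i ≤ d * d := by nlinarith
          omega

-- for 2 ≤ n ≤ limite, passing trial division up to √n is exactly not being marked
theorem pred_eq (limite n : Int) (h2 : 2 ≤ n) (hl : n ≤ limite) :
    eh_primo n = !(PySem.Set.contains (crivoLoop limite 2 (by omega) PySem.Set.empty) n) := by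
  have hmem : n ∈ crivoLoop limite 2 (by omega) PySem.Set.empty ↔
      ∃ d, 2 ≤ d ∧ d * d ≤ limite ∧ d ∣ n ∧ d * d ≤ n ∧ n ≤ limite := by
    rw [mem_crivoLoop]
    simp [PySem.Set.empty]
  have hA : eh_primo n = true ↔
      ∀ i : Int, 2 ≤ i ∧ i < (Nat.sqrt n.toNat : Int) + 1 → ¬ i ∣ n := by
    unfold eh_primo
    rw [if_neg (by omega)]
    simp only [List.all_eq_true, PySem.List.mem_pyRange_one]
    constructor
    · intro h i hi
      have := h i hi
      simp only [Bool.not_eq_eq_eq_not, Bool.not_true, beq_eq_false_iff_ne] at this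
      intro hdvd
      exact this ((PySem.Int.mod_eq_zero_iff_dvd n i).mpr hdvd)
    · intro h i hi
      simp only [Bool.not_eq_eq_eq_not, Bool.not_true, beq_eq_false_iff_ne]
      intro hmod
      exact h i hi ((PySem.Int.mod_eq_zero_iff_dvd n i).mp hmod)
  have key : (eh_primo n = true) ↔ ¬ (n ∈ crivoLoop limite 2 (by omega) PySem.Set.empty) := by
    rw [hA, hmem]
    constructor
    · rintro h ⟨d, hd1, hd2, hd3, hd4, hd5⟩
      refine h d ⟨hd1, ?_⟩ hd3
      have hd0 : (0:Int) ≤ d := by omega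
      have hnn : (d.toNat) * (d.toNat) ≤ n.toNat := by
        have h1 : ((d.toNat : Int)) = d := Int.toNat_of_nonneg hd0
        have h2' : ((n.toNat : Int)) = n := Int.toNat_of_nonneg (by omega)
        have : ((d.toNat * d.toNat : Nat) : Int) ≤ ((n.toNat : Nat) : Int) := by
          push_cast [h1, h2']
          exact hd4
        exact_mod_cast this
      have hsq : d.toNat ≤ Nat.sqrt n.toNat := Nat.le_sqrt.mpr hnn
      omega
    · intro h i hi hdvd
      apply h
      have hi2 : 2 ≤ i := hi.1
      have hisq : i.toNat ≤ Nat.sqrt n.toNat := by omega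
      have hii : i.toNat * i.toNat ≤ n.toNat := Nat.le_sqrt.mp hisq
      have hiin : i * i ≤ n := by
        have h1 : ((i.toNat : Int)) = i := Int.toNat_of_nonneg (by omega)
        have h2' : ((n.toNat : Int)) = n := Int.toNat_of_nonneg (by omega)
        have : ((i.toNat * i.toNat : Nat) : Int) ≤ ((n.toNat : Nat) : Int) := by
          exact_mod_cast hii
        push_cast [h1, h2'] at this
        exact this
      exact ⟨i, hi2, by omega, hdvd, hiin, hl⟩
  cases hc : (crivoLoop limite 2 (by omega) PySem.Set.empty).contains n with
  | true =>
      have hin : n ∈ crivoLoop limite 2 (by omega) PySem.Set.empty :=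
        (PySem.Set.contains_iff _ _).mp hc
      have hne : eh_primo n ≠ true := fun h => (key.mp h) hin
      simp only [Bool.not_true]
      exact Bool.eq_false_iff.mpr hne
  | false =>
      have hnotin : n ∉ crivoLoop limite 2 (by omega) PySem.Set.empty := by
        intro hm
        rw [(PySem.Set.contains_iff _ _).mpr hm] at hc
        simp at hc
      simp only [Bool.not_false]
      exact key.mpr hnotin

theorem primes_eq (limite : Int) : gerar_primos limite = crivo limite := by
  unfold gerar_primos crivo
  rw [PySem.List.foldl_append_if_eq_filter]
  simp only [List.nil_append]
  apply List.filter_congr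
  intro n hn
  rw [PySem.List.mem_pyRange_one] at hn
  exact pred_eq limite n hn.1 (by omega)

-- the suffix recursions characterise A's index loops (over any list l, from index a)
theorem inner_eq (l : List Int) (p : Int) : ∀ (m : Nat) (a : Int), 0 ≤ a →
    l.length - a.toNat = m →
    (PySem.List.pyRange a (l.length : Int) 1).flatMap (fun j =>
      (PySem.List.pyRange (j + 1) (l.length : Int) 1).map (fun k =>
        p * PySem.List.pyGetD l j 0 * PySem.List.pyGetD l k 0))
    = prodParesP p (l.drop a.toNat) := by
  intro m
  induction m with
  | zero =>
      intro a ha hm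
      have hge : (l.length : Int) ≤ a := by omega
      rw [PySem.List.pyRange_one_eq_nil hge, List.drop_eq_nil_of_le (by omega)]
      simp [prodParesP]
  | succ m ih =>
      intro a ha hm
      have hlt : a < (l.length : Int) := by omega
      have hlt' : a.toNat < l.length := by omega
      rw [PySem.List.pyRange_one_cons hlt, List.flatMap_cons]
      have hdrop : l.drop a.toNat = l[a.toNat] :: l.drop (a.toNat + 1) :=
        List.drop_eq_getElem_cons hlt'
      have htn : (a + 1).toNat = a.toNat + 1 := by omega
      have hget : PySem.List.pyGetD l a 0 = l[a.toNat] :=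
        PySem.List.pyGetD_eq_getElem l 0 ha (by exact_mod_cast hlt)
      have hhead : (PySem.List.pyRange (a + 1) (l.length : Int) 1).map (fun k =>
          p * PySem.List.pyGetD l a 0 * PySem.List.pyGetD l k 0)
          = (l.drop (a.toNat + 1)).map (fun r => p * l[a.toNat] * r) := by
        calc (PySem.List.pyRange (a + 1) (l.length : Int) 1).map (fun k =>
            p * PySem.List.pyGetD l a 0 * PySem.List.pyGetD l k 0)
            = ((PySem.List.pyRange (a + 1) (l.length : Int) 1).map
                (fun k => PySem.List.pyGetD l k 0)).map (fun r => p * l[a.toNat] * r) := by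
              rw [List.map_map]
              refine List.map_congr_left ?_
              intro k _
              simp [Function.comp, hget]
          _ = (l.drop (a.toNat + 1)).map (fun r => p * l[a.toNat] * r) := by
              rw [PySem.List.map_pyGetD_pyRange' l 0 (by omega : (0:Int) ≤ a + 1), htn]
      rw [hdrop, prodParesP, hhead]
      congr 1
      rw [← htn]
      exact ih (a + 1) (by omega) (by omega)

theorem outer_eq (l : List Int) : ∀ (m : Nat) (a : Int), 0 ≤ a →
    l.length - a.toNat = m →
    (PySem.List.pyRange a (l.length : Int) 1).flatMap (fun i =>
      (PySem.List.pyRange (i + 1) (l.length : Int) 1).flatMap (fun j =>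
        (PySem.List.pyRange (j + 1) (l.length : Int) 1).map (fun k =>
          PySem.List.pyGetD l i 0 * PySem.List.pyGetD l j 0 * PySem.List.pyGetD l k 0)))
    = triplosP (l.drop a.toNat) := by
  intro m
  induction m with
  | zero =>
      intro a ha hm
      have hge : (l.length : Int) ≤ a := by omega
      rw [PySem.List.pyRange_one_eq_nil hge, List.drop_eq_nil_of_le (by omega)]
      simp [triplosP]
  | succ m ih =>
      intro a ha hm
      have hlt : a < (l.length : Int) := by omega
      have hlt' : a.toNat < l.length := by omega
      rw [PySem.List.pyRange_one_cons hlt, List.flatMap_cons]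
      have hdrop : l.drop a.toNat = l[a.toNat] :: l.drop (a.toNat + 1) :=
        List.drop_eq_getElem_cons hlt'
      have htn : (a + 1).toNat = a.toNat + 1 := by omega
      have hhead := inner_eq l (PySem.List.pyGetD l a 0) (l.length - (a + 1).toNat)
        (a + 1) (by omega) rfl
      rw [hdrop, triplosP, hhead, htn]
      congr 1
      · rw [PySem.List.pyGetD_eq_getElem l 0 ha (by exact_mod_cast hlt)]
      · rw [← htn]
        exact ih (a + 1) (by omega) (by omega)

theorem A_eq (limite : Int) :
    produtos_de_tres_primos limite = triplosP (gerar_primos limite) := by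
  unfold produtos_de_tres_primos
  simp only [PySem.List.foldl_append_singleton_eq_map, PySem.List.foldl_append_eq_flatMap,
    List.nil_append]
  have := outer_eq (gerar_primos limite) ((gerar_primos limite).length) 0 (by omega)
    (by simp)
  simpa using this

-- ===== VERDICT (by name: the statement is the Claim_ definition above) =====
theorem produtos_de_tres_primos_spec : Claim_equal_produtos_de_tres_primos := by
  intro limite _
  unfold Spec_produtos_de_tres_primos produtos_de_tres_primos_alt
  rw [triplosAcc_eq, List.nil_append, ← primes_eq]
  exact A_eq limite
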